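-- pv_equiv track=rewrite | github.com/neuromodulation/manuscript-binns_cortex_stn_comm | coherence/coh_handle_entries.py | combine_dicts
-- ===== SOURCE A (Python) =====
-- from typing import Any, Optional, Union
--
-- def check_repeated_vals(
--     to_check: list,
-- ) -> tuple[bool, Optional[list]]:
--     """Checks whether repeated values exist within an input list.
--
--     PARAMETERS
--     ----------
--     to_check : list
--     -   The list of values whose entries should be checked for repeats.
--
--     RETURNS
--     -------
--     repeats : bool
--     -   Whether or not repeats are present.
--
--     repeated_vals : list | None
--     -   The list of repeated values, or 'None' if no repeats are present.
--     """
--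
--     seen = set()
--     seen_add = seen.add
--     repeated_vals = list(
--         set(val for val in to_check if val in seen or seen_add(val))
--     )
--     if not repeated_vals:
--         repeats = False
--         repeated_vals = None
--     else:
--         repeats = True
--
--     return repeats, repeated_vals
--
-- def combine_dicts(dicts: list[dict]) -> dict:
--     """Combines a list of dictionaries into a single dictionary.
--
--     PARAMETERS
--     ----------
--     dicts : list of dict
--     -   The dictionaries to combine.
--
--     RAISES
--     ------
--     KeyError
--     -   Raised if not all keys in the dictionaries are unique.
--     """
--     all_keys = [
--         key for single_dict in dicts for key in list(single_dict.keys())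
--     ]
--     repeats_present, repeated_keys = check_repeated_vals(all_keys)
--     if repeats_present:
--         raise KeyError(
--             "The dictionaries being combined must have unique keys, but the "
--             f"following keys are shared: {repeated_keys}."
--         )
--
--     combined_dict = {}
--     [combined_dict.update(single_dict) for single_dict in dicts]
--
--     return combined_dict
-- ===== SOURCE B (Python) =====
-- def combine_dicts(dicts: list[dict]) -> dict:
--     """Combines a list of dictionaries into a single dictionary, raising
--     KeyError if any key occurs in more than one dictionary.
--
--     Single fused pass: detection of repeated keys and merging happen in one
--     traversal, with no all-keys list and no separate helper.
--     """
--     combined = {}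
--     seen = set()
--     repeats = set()
--     for single_dict in dicts:
--         for key, value in single_dict.items():
--             if key in seen:
--                 repeats.add(key)
--             seen.add(key)
--             combined[key] = value
--     if repeats:
--         raise KeyError(
--             "The dictionaries being combined must have unique keys, but the "
--             f"following keys are shared: {list(repeats)}."
--         )
--     return combined
-- ===== Notes on version B (the rewrite author's own statement) =====
-- stated objective: simpler
-- what changed: One fused traversal maintains the merged dict plus seen/repeats sets, replacing A's three phases (build all-keys list, check_repeated_vals helper with a set comprehension, then a separate update loop).
import Mathlib
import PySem

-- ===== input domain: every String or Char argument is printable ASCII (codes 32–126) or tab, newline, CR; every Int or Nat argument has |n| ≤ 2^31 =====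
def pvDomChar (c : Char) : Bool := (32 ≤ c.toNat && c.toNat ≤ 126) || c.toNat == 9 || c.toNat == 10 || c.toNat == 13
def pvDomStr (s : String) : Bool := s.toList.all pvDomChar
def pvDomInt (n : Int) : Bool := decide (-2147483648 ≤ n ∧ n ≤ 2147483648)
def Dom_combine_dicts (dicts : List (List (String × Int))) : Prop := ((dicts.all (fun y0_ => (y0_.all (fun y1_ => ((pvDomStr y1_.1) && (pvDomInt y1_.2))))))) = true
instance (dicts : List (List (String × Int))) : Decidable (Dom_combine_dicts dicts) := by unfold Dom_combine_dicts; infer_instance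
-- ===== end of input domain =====

-- B fuses A's three phases (all-keys list, repeat check via helper, update loop) into one traversal
-- maintaining the merged dict plus seen/repeats sets (objective: simpler). Both raise KeyError on
-- shared keys; those inputs are outside Pre_.


-- ===== PORT A =====
-- seen/seen_add duplicate-detection fold; repeated_vals is a Python set (its iteration order is
-- only consumed inside the raised KeyError message, which Pre_ excludes).
def check_repeated_vals (to_check : List String) : Bool × Option (List String) :=
  let seenRep := to_check.foldl
    (fun (st : PySem.Set String × PySem.Set String) v =>
      if PySem.Set.contains st.1 v then (st.1, PySem.Set.add st.2 v)
      else (PySem.Set.add st.1 v, st.2))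
    (PySem.Set.empty, PySem.Set.empty)
  if seenRep.2 = [] then (false, none) else (true, some seenRep.2)

-- each inner association list models a Python dict, so it is read through PySem.Dict.ofList
def combine_dicts (dicts : List (List (String × Int))) : List (String × Int) :=
  let all_keys := dicts.flatMap (fun d => (PySem.Dict.ofList d).keys)
  let rp := check_repeated_vals all_keys
  if rp.1 then []  -- raise KeyError: excluded by Pre_
  else
    (dicts.foldl (fun acc d => acc.update (PySem.Dict.ofList d).items)
      (PySem.Dict.empty : PySem.Dict String Int)).items

-- ===== PORT B =====
def combine_dicts_alt (dicts : List (List (String × Int))) : List (String × Int) :=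
  let st := dicts.foldl
    (fun (st : PySem.Dict String Int × PySem.Set String × PySem.Set String) d =>
      (PySem.Dict.ofList d).items.foldl
        (fun st p =>
          let reps := if PySem.Set.contains st.2.1 p.1 then PySem.Set.add st.2.2 p.1 else st.2.2
          (st.1.insert p.1 p.2, PySem.Set.add st.2.1 p.1, reps))
        st)
    ((PySem.Dict.empty : PySem.Dict String Int), PySem.Set.empty, PySem.Set.empty)
  if st.2.2 = [] then st.1.items else []  -- raise KeyError: excluded by Pre_

-- ===== PRECONDITION & SPEC =====
-- Pre_ excludes exactly the inputs where a key occurs in more than one dictionary: there A (and B)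
-- raises KeyError, whose message embeds an arbitrarily-ordered set listing.
def Pre_combine_dicts (dicts : List (List (String × Int))) : Prop :=
  (dicts.flatMap (fun d => PySem.List.dedup (d.map Prod.fst))).Nodup
instance (dicts : List (List (String × Int))) : Decidable (Pre_combine_dicts dicts) := by
  unfold Pre_combine_dicts; infer_instance

def pvWitness_combine_dicts : (List (List (String × Int))) :=
  [[("a", 1), ("b", 2)], [("c", 3)], []]

def Spec_combine_dicts (dicts : List (List (String × Int))) (out : List (String × Int)) : Prop := out = combine_dicts_alt dicts
instance (dicts : List (List (String × Int))) (out : List (String × Int)) : Decidable (Spec_combine_dicts dicts out) := by unfold Spec_combine_dicts; infer_instance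

-- ===== CLAIM (what is proved, stated in full; the proofs are below) =====
def Claim_equal_combine_dicts : Prop := ∀ (dicts : List (List (String × Int))), Dom_combine_dicts dicts → Pre_combine_dicts dicts → Spec_combine_dicts dicts (combine_dicts dicts)

-- ===== LEMMAS AND PROOFS =====

-- A's duplicate-detection step over a key
def pvAStep (st : PySem.Set String × PySem.Set String) (v : String) :
    PySem.Set String × PySem.Set String :=
  if PySem.Set.contains st.1 v then (st.1, PySem.Set.add st.2 v)
  else (PySem.Set.add st.1 v, st.2)

-- B's fused step over a key/value pair
def pvBStep (st : PySem.Dict String Int × PySem.Set String × PySem.Set String)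
    (p : String × Int) : PySem.Dict String Int × PySem.Set String × PySem.Set String :=
  let reps := if PySem.Set.contains st.2.1 p.1 then PySem.Set.add st.2.2 p.1 else st.2.2
  (st.1.insert p.1 p.2, PySem.Set.add st.2.1 p.1, reps)

theorem pv_keys_ofList (d : List (String × Int)) :
    (PySem.Dict.ofList d).keys = PySem.List.dedup (d.map Prod.fst) := by
  have h := PySem.Dict.keys_foldl_insert_key (ν := Int) d Prod.fst (fun _ p => p.2)
      PySem.Dict.empty
  simpa [PySem.Dict.ofList, PySem.Dict.update, PySem.Dict.keys_empty,
    PySem.List.dedup_eq_ofList, PySem.Set.ofList_eq_foldl, PySem.Set.update] using h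

-- B's merged dict: the first component of the fused fold is the plain insert fold
theorem pv_bfold_fst (L : List (String × Int))
    (st : PySem.Dict String Int × PySem.Set String × PySem.Set String) :
    (L.foldl pvBStep st).1 = L.foldl (fun acc p => acc.insert p.1 p.2) st.1 := by
  induction L generalizing st with
  | nil => rfl
  | cons p t ih => simp [List.foldl_cons, pvBStep, ih]

-- B's seen/repeats components evolve exactly as A's detection fold over the key sequence
theorem pv_bfold_snd (L : List (String × Int))
    (st : PySem.Dict String Int × PySem.Set String × PySem.Set String) :
    (L.foldl pvBStep st).2 = (L.map Prod.fst).foldl pvAStep st.2 := by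
  induction L generalizing st with
  | nil => rfl
  | cons p t ih =>
    simp only [List.foldl_cons, List.map_cons, ih]
    congr 1
    by_cases hc : PySem.Set.contains st.2.1 p.1 = true
    · simp only [pvBStep, pvAStep, hc, if_true, PySem.Set.add]
    · simp only [pvBStep, pvAStep, hc, Bool.false_eq_true, if_false]

-- on a duplicate-free key sequence disjoint from the seen set, no repeat is ever recorded
theorem pv_afold_nodup (keys : List String) (s r : PySem.Set String)
    (hnd : keys.Nodup) (hdisj : ∀ v ∈ keys, v ∉ s) :
    (keys.foldl pvAStep (s, r)).2 = r := by
  induction keys generalizing s with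
  | nil => rfl
  | cons k t ih =>
    have hk : PySem.Set.contains s k = false := by
      simp [PySem.Set.contains]
      exact hdisj k (by simp)
    simp only [List.foldl_cons, pvAStep, hk, Bool.false_eq_true, if_false]
    apply ih _ (List.Nodup.of_cons hnd)
    intro v hv
    have h1 : v ∉ s := hdisj v (List.mem_cons_of_mem _ hv)
    have h2 : v ≠ k := by
      intro h; subst h; exact (List.nodup_cons.mp hnd).1 hv
    intro hmem
    rcases (PySem.Set.mem_add s k v).mp hmem with h | h
    · exact h1 h
    · exact h2 h

-- the flattened key/value traversal both ports perform
def pvPairs (dicts : List (List (String × Int))) : List (String × Int) :=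
  dicts.flatMap (fun d => (PySem.Dict.ofList d).items)

theorem pv_allkeys_eq (dicts : List (List (String × Int))) :
    dicts.flatMap (fun d => (PySem.Dict.ofList d).keys) = (pvPairs dicts).map Prod.fst := by
  simp [pvPairs, List.map_flatMap, PySem.Dict.keys]

theorem pv_allkeys_nodup (dicts : List (List (String × Int)))
    (h : Pre_combine_dicts dicts) :
    (dicts.flatMap (fun d => (PySem.Dict.ofList d).keys)).Nodup := by
  unfold Pre_combine_dicts at h
  have : (fun d : List (String × Int) => (PySem.Dict.ofList d).keys)
      = fun d => PySem.List.dedup (d.map Prod.fst) := funext pv_keys_ofList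
  rw [this]; exact h

-- ===== VERDICT (by name: the statement is the Claim_ definition above) =====
theorem combine_dicts_spec : Claim_equal_combine_dicts := by
  intro dicts _ hpre
  show combine_dicts dicts = combine_dicts_alt dicts
  have hnd := pv_allkeys_nodup dicts hpre
  have hkeys := pv_allkeys_eq dicts
  -- A's repeat-detection fold ends with an empty repeated set
  have hA : ((dicts.flatMap (fun d => (PySem.Dict.ofList d).keys)).foldl pvAStep
      ([], [])).2 = ([] : PySem.Set String) := by
    apply pv_afold_nodup _ _ _ hnd
    intro v _ hv
    simp at hv
  -- so does B's (same key sequence, by pv_bfold_snd)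
  have hB2 : ((pvPairs dicts).foldl pvBStep
      (PySem.Dict.empty, [], [])).2.2 = ([] : PySem.Set String) := by
    have h := pv_bfold_snd (pvPairs dicts) (PySem.Dict.empty, [], [])
    have h2 : ((pvPairs dicts).foldl pvBStep (PySem.Dict.empty, [], [])).2.2
        = (((pvPairs dicts).map Prod.fst).foldl pvAStep ([], [])).2 :=
      congrArg Prod.snd h
    rw [h2, ← hkeys]; exact hA
  -- name the two step functions inside the unfolded ports
  unfold combine_dicts combine_dicts_alt check_repeated_vals
  rw [show (fun (st : PySem.Set String × PySem.Set String) (v : String) =>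
        if PySem.Set.contains st.1 v = true then (st.1, PySem.Set.add st.2 v)
        else (PySem.Set.add st.1 v, st.2)) = pvAStep from rfl,
      show (fun (st : PySem.Dict String Int × PySem.Set String × PySem.Set String)
            (p : String × Int) =>
        let reps := if PySem.Set.contains st.2.1 p.1 = true then PySem.Set.add st.2.2 p.1
          else st.2.2
        (st.1.insert p.1 p.2, PySem.Set.add st.2.1 p.1, reps)) = pvBStep from rfl]
  -- flatten B's nested fold and A's update fold over the flattened pair list
  rw [show (fun (st : PySem.Dict String Int × PySem.Set String × PySem.Set String)
        (d : List (String × Int)) => (PySem.Dict.ofList d).items.foldl pvBStep st)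
      = (fun st d => List.foldl pvBStep st ((fun d => (PySem.Dict.ofList d).items) d)) from rfl,
    ← List.foldl_flatMap, ← pvPairs]
  rw [show (fun (acc : PySem.Dict String Int) (d : List (String × Int)) =>
        acc.update (PySem.Dict.ofList d).items)
      = (fun acc d => List.foldl (fun acc p => acc.insert p.1 p.2) acc
          ((fun d => (PySem.Dict.ofList d).items) d)) from rfl,
    ← List.foldl_flatMap, ← pvPairs]
  simp [hA, hB2, pv_bfold_fst]
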